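-- pv_equiv track=rewrite | github.com/AP-MI-2021/lab-3-ecedialex | main.py | get_longest_prime_digits
-- ===== SOURCE A (Python) =====
-- from typing import List
--
-- def prime_digit(n):
--     if n==2:
--         return True
--     if n==3:
--         return True
--     if n==5:
--         return True
--     if n==7:
--         return True
--     return False
--
-- def all_digits_prime(n):
--     """
--     Determina data toate cifrele unui numar sunt prime
--     :param n: numar intreg
--     :return: True daca n este format doar din cifre prime
--              False daca n nu este format doar din cifre prime
--     """
--     while n!=0:
--         if prime_digit(n%10) != True:
--             return False
--         n=n//10
--     return True
--
-- def get_longest_prime_digits(lst: List[int]) -> List[int]: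
--     """
--     Determina cea mai mare subsecventa in care toate elementele sunt formate din cifre prime
--     :param lst: lista in care se cauta subsecventa
--     :return: subsecventa gasita
--     """
--     n=len(lst)
--     result=[]
--     for st in range(n):
--         for dr in range (st,n):
--             all_prime=True
--             for num in lst[st:dr+1]:
--                 if all_digits_prime(num) != True:
--                     all_prime=False
--                     break
--             if all_prime == True:
--                 if dr-st +1 > len(result):
--                     result=lst[st:dr+1]
--     return result
-- ===== SOURCE B (Python) =====
-- from typing import List
--
-- def _all_digits_prime(n):
--     if n < 0:
--         return False
--     while n > 0:
--         if n % 10 not in (2, 3, 5, 7):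
--             return False
--         n //= 10
--     return True
--
-- def get_longest_prime_digits(lst: List[int]) -> List[int]:
--     """Single linear pass: collect runs of prime-digit numbers, keep the leftmost longest."""
--     best = []
--     cur = []
--     for x in lst:
--         if _all_digits_prime(x):
--             cur.append(x)
--         else:
--             if len(cur) > len(best):
--                 best = cur
--             cur = []
--     if len(cur) > len(best):
--         best = cur
--     return best
-- ===== Notes on version B (the rewrite author's own statement) =====
-- stated objective: faster
-- what changed: Replaced A's enumeration of all O(n^2) windows (each re-checked element by element) with a single left-to-right pass that accumulates the current run of prime-digit numbers and keeps the leftmost longest run.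
import Mathlib
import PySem

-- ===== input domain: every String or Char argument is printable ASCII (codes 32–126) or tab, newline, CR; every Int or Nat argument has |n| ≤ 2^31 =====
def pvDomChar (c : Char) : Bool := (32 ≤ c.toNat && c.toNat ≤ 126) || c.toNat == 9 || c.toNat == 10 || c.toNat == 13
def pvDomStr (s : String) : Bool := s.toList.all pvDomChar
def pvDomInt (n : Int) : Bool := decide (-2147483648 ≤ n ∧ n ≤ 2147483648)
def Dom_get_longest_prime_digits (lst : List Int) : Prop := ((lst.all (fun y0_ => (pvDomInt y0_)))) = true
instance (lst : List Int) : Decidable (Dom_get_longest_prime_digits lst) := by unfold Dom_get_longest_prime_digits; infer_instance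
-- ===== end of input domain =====

-- B replaces A's scan of all O(n^2) windows (each re-checked element by element) by one
-- left-to-right pass collecting runs of prime-digit numbers and keeping the leftmost longest run.

-- ===== PORT A =====
def primeDigit (n : Int) : Bool :=
  if n == 2 then true
  else if n == 3 then true
  else if n == 5 then true
  else if n == 7 then true
  else false

-- termination helper for A's while loop (cited in decreasing_by below)
theorem pv_fdiv_abs_lt (n : Int) (h0 : n ≠ 0) (h1 : n ≠ -1) :
    (PySem.Int.floordiv n 10).natAbs < n.natAbs := by
  rw [PySem.Int.floordiv_eq_ediv_of_pos (by omega)]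
  omega

def allDigitsPrime (n : Int) : Bool :=
  if h0 : n = 0 then true
  else if hp : primeDigit (PySem.Int.mod n 10) ≠ true then false
  else allDigitsPrime (PySem.Int.floordiv n 10)
termination_by n.natAbs
decreasing_by
  have h1 : n ≠ -1 := by
    rintro rfl
    exact hp (by decide)
  exact pv_fdiv_abs_lt n h0 h1

-- A's inner 'for num in lst[st:dr+1]: … break' loop
def checkAllPrime : List Int → Bool
  | [] => true
  | num :: rest => if allDigitsPrime num ≠ true then false else checkAllPrime rest

def get_longest_prime_digits (lst : List Int) : List Int :=
  let n : Int := PySem.List.len lst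
  (PySem.List.pyRange 0 n 1).foldl (fun result st =>
    (PySem.List.pyRange st n 1).foldl (fun result dr =>
      let window := PySem.List.slice lst (some st) (some (dr + 1))
      if checkAllPrime window then
        if dr - st + 1 > PySem.List.len result then window else result
      else result) result) []

-- ===== PORT B =====
def altAllPrimeLoop (n : Int) : Bool :=
  if h : 0 < n then
    if !(PySem.Int.mod n 10 == 2 || PySem.Int.mod n 10 == 3 ||
         PySem.Int.mod n 10 == 5 || PySem.Int.mod n 10 == 7) then false
    else altAllPrimeLoop (PySem.Int.floordiv n 10)
  else true
termination_by n.toNat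
decreasing_by
  rw [PySem.Int.floordiv_eq_ediv_of_pos (by omega)]
  omega

def altAllDigitsPrime (n : Int) : Bool :=
  if n < 0 then false else altAllPrimeLoop n

def get_longest_prime_digits_alt (lst : List Int) : List Int :=
  let s := lst.foldl (fun (s : List Int × List Int) x =>
    if altAllDigitsPrime x then (s.1, s.2 ++ [x])
    else (if s.2.length > s.1.length then s.2 else s.1, ([] : List Int))) ([], [])
  if s.2.length > s.1.length then s.2 else s.1

-- ===== PRECONDITION & SPEC =====
def Spec_get_longest_prime_digits (lst : List Int) (out : List Int) : Prop := out = get_longest_prime_digits_alt lst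
instance (lst : List Int) (out : List Int) : Decidable (Spec_get_longest_prime_digits lst out) := by unfold Spec_get_longest_prime_digits; infer_instance

-- ===== CLAIM (what is proved, stated in full; the proofs are below) =====
def Claim_equal_get_longest_prime_digits : Prop := ∀ (lst : List Int), Dom_get_longest_prime_digits lst → Spec_get_longest_prime_digits lst (get_longest_prime_digits lst)

-- ===== LEMMAS AND PROOFS =====

-- 'keep the later candidate only if strictly longer' — the update both programs use
def pvf (r c : List Int) : List Int := if c.length > r.length then c else r

-- leftmost longest all-prime run, as a structural recursion over the list
def pvbest : List Int → List Int
  | [] => []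
  | x :: xs => pvf ((x :: xs).takeWhile altAllDigitsPrime) (pvbest xs)

-- B's loop state: current run c still open, remaining input l
def pvm : List Int → List Int → List Int
  | c, [] => c
  | c, x :: l => if altAllDigitsPrime x then pvm (c ++ [x]) l else pvf c (pvm [] l)

theorem pvf_nil_left (c : List Int) : pvf [] c = c := by
  unfold pvf
  split
  · rfl
  · next h =>
      simp only [List.length_nil, gt_iff_lt, Nat.not_lt, Nat.le_zero, List.length_eq_zero_iff] at h
      exact h.symm

theorem pvf_nil_right (r : List Int) : pvf r [] = r := by
  simp [pvf]

theorem pvf_assoc (a b c : List Int) : pvf (pvf a b) c = pvf a (pvf b c) := by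
  unfold pvf
  split_ifs <;> first | rfl | omega

theorem pvf_idem (a z : List Int) : pvf a (pvf a z) = pvf a z := by
  unfold pvf
  split_ifs <;> rfl

theorem pvf_absorb (a b z : List Int) (h : b.length ≤ a.length) :
    pvf a (pvf b z) = pvf a z := by
  unfold pvf
  split_ifs <;> first | rfl | omega

theorem pv_primeDigit_eq (d : Int) :
    primeDigit d = (d == 2 || d == 3 || d == 5 || d == 7) := by
  unfold primeDigit
  split_ifs <;> simp_all

theorem pv_allDigits_eq (n : Int) : allDigitsPrime n = altAllDigitsPrime n := by
  have hfd : PySem.Int.floordiv n 10 = n / 10 := PySem.Int.floordiv_eq_ediv_of_pos (by omega)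
  by_cases h0 : n = 0
  · subst h0
    rw [allDigitsPrime, dif_pos rfl, altAllDigitsPrime, if_neg (by omega),
        altAllPrimeLoop, dif_neg (by omega)]
  · by_cases hp : primeDigit (PySem.Int.mod n 10) ≠ true
    · rw [allDigitsPrime, dif_neg h0, dif_pos hp]
      have hor : (PySem.Int.mod n 10 == 2 || PySem.Int.mod n 10 == 3 ||
          PySem.Int.mod n 10 == 5 || PySem.Int.mod n 10 == 7) = false := by
        rw [← pv_primeDigit_eq]
        revert hp
        cases primeDigit (PySem.Int.mod n 10) <;> simp
      rw [altAllDigitsPrime]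
      split
      · rfl
      · rw [altAllPrimeLoop, dif_pos (by omega), hor]
        simp
    · have hp' : primeDigit (PySem.Int.mod n 10) = true := by
        revert hp
        cases primeDigit (PySem.Int.mod n 10) <;> simp
      have h1 : n ≠ -1 := by
        rintro rfl
        exact absurd hp' (by decide)
      rw [allDigitsPrime, dif_neg h0, dif_neg hp]
      have ih := pv_allDigits_eq (PySem.Int.floordiv n 10)
      rw [ih]
      by_cases hneg : n < 0
      · rw [altAllDigitsPrime, altAllDigitsPrime, hfd,
            if_pos (show n / 10 < 0 by omega), if_pos hneg]
      · have hpos : 0 < n := by omega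
        rw [altAllDigitsPrime, altAllDigitsPrime, hfd,
            if_neg (show ¬ n / 10 < 0 by omega), if_neg hneg]
        conv_rhs => rw [altAllPrimeLoop]
        rw [dif_pos hpos, ← pv_primeDigit_eq, hp', hfd]
        simp
termination_by n.natAbs
decreasing_by exact pv_fdiv_abs_lt n h0 h1

theorem pv_checkAll_eq (l : List Int) : checkAllPrime l = l.all altAllDigitsPrime := by
  induction l with
  | nil => rfl
  | cons x xs ih =>
    rw [checkAllPrime, List.all_cons, ih, pv_allDigits_eq]
    cases altAllDigitsPrime x <;> simp

theorem pv_take_takeWhile (p : Int → Bool) (l : List Int) :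
    l.take (l.takeWhile p).length = l.takeWhile p := by
  obtain ⟨t, ht⟩ := (List.takeWhile_prefix p (l := l))
  have h2 := List.take_left (l₁ := l.takeWhile p) (l₂ := t)
  rw [ht] at h2
  exact h2

theorem pv_all_take_iff (p : Int → Bool) (l : List Int) (k : Nat) (hk : k ≤ l.length) :
    ((l.take k).all p = true ↔ k ≤ (l.takeWhile p).length) := by
  induction l generalizing k with
  | nil =>
    simp only [List.length_nil, Nat.le_zero] at hk
    subst hk
    simp
  | cons x xs ih =>
    cases k with
    | zero => simp
    | succ k =>
      simp only [List.take_succ_cons, List.all_cons, List.takeWhile]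
      cases hx : p x with
      | false => simp
      | true =>
        simp only [Bool.true_and, List.length_cons]
        rw [ih k (by simpa using hk)]
        omega

-- the whole inner dr-loop of A, characterised
theorem pv_inner_fold (lst : List Int) (st : Int) (hst : 0 ≤ st) (k : Nat) :
    ∀ (d0 : Int), st ≤ d0 → d0 + k = (lst.length : Int) → ∀ (r : List Int),
    (PySem.List.pyRange d0 (lst.length : Int) 1).foldl (fun result dr =>
      if checkAllPrime (PySem.List.slice lst (some st) (some (dr + 1))) then
        if dr - st + 1 > (result.length : Int)
        then PySem.List.slice lst (some st) (some (dr + 1)) else result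
      else result) r
    = if d0 - st + 1 ≤ (((lst.drop st.toNat).takeWhile altAllDigitsPrime).length : Int)
      then pvf r ((lst.drop st.toNat).takeWhile altAllDigitsPrime) else r := by
  induction k with
  | zero =>
    intro d0 hd hlen r
    have h1 := (List.takeWhile_prefix altAllDigitsPrime (l := lst.drop st.toNat)).length_le
    have h2 : (lst.drop st.toNat).length = lst.length - st.toNat := List.length_drop
    rw [PySem.List.pyRange_one_eq_nil (by omega), List.foldl_nil, if_neg (by omega)]
  | succ k ih =>
    intro d0 hd hlen r
    have h1 := (List.takeWhile_prefix altAllDigitsPrime (l := lst.drop st.toNat)).length_le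
    have h2 : (lst.drop st.toNat).length = lst.length - st.toNat := List.length_drop
    have hslice := PySem.List.slice_toNat lst (a := st) (b := d0 + 1) hst (by omega)
    set D := lst.drop st.toNat with hD
    set tw := D.takeWhile altAllDigitsPrime with htw
    set K : Nat := (d0 + 1).toNat - st.toNat with hKdef
    have hKi : (K : Int) = d0 + 1 - st := by omega
    have hKD : K ≤ D.length := by omega
    have hlenK : (D.take K).length = K := by
      rw [List.length_take]; omega
    rw [PySem.List.pyRange_one_cons (by omega), List.foldl_cons,
        ih (d0 + 1) (by omega) (by omega)]
    by_cases hw : K ≤ tw.length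
    · have hall : (D.take K).all altAllDigitsPrime = true :=
        (pv_all_take_iff altAllDigitsPrime D K hKD).mpr hw
      simp only [hslice, pv_checkAll_eq, hall, if_true]
      by_cases hw2 : d0 + 1 - st + 1 ≤ (tw.length : Int)
      · rw [if_pos hw2]
        rw [if_pos (show d0 - st + 1 ≤ (tw.length : Int) by omega)]
        by_cases hc : d0 - st + 1 > (r.length : Int)
        · rw [if_pos hc]
          unfold pvf
          rw [if_pos (by omega), if_pos (by omega)]
        · rw [if_neg hc]
      · rw [if_neg hw2]
        rw [if_pos (show d0 - st + 1 ≤ (tw.length : Int) by omega)]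
        have htweq : tw.length = K := by omega
        have hDK : D.take K = tw := by
          rw [← htweq, htw, pv_take_takeWhile]
        rw [hDK]
        unfold pvf
        by_cases hc : d0 - st + 1 > (r.length : Int)
        · rw [if_pos hc, if_pos (by omega)]
        · rw [if_neg hc, if_neg (by omega)]
    · have hall : (D.take K).all altAllDigitsPrime = false := by
        rw [Bool.eq_false_iff]
        exact fun h => hw ((pv_all_take_iff altAllDigitsPrime D K hKD).mp h)
      simp only [hslice, pv_checkAll_eq, hall, Bool.false_eq_true, if_false]
      rw [if_neg (by omega), if_neg (by omega)]

theorem pv_foldl_pvf (cs : List (List Int)) : ∀ a, List.foldl pvf a cs = pvf a (List.foldl pvf [] cs) := by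
  induction cs with
  | nil => intro a; simp [pvf_nil_right]
  | cons c cs ih =>
    intro a
    simp only [List.foldl_cons]
    rw [ih (pvf a c), ih (pvf [] c), pvf_nil_left, pvf_assoc]

theorem pv_lmax_best (lst : List Int) :
    List.foldl pvf [] ((List.range lst.length).map
      (fun j => (lst.drop j).takeWhile altAllDigitsPrime)) = pvbest lst := by
  induction lst with
  | nil => rfl
  | cons x xs ih =>
    have hc : (List.range (x :: xs).length).map
        (fun j => ((x :: xs).drop j).takeWhile altAllDigitsPrime)
        = ((x :: xs).takeWhile altAllDigitsPrime)
          :: (List.range xs.length).map (fun j => (xs.drop j).takeWhile altAllDigitsPrime) := by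
      simp [List.range_succ_eq_map, List.map_map, Function.comp]
    rw [hc, List.foldl_cons, pvf_nil_left, pv_foldl_pvf, ih, pvbest]

theorem pv_A_eq_best (lst : List Int) : get_longest_prime_digits lst = pvbest lst := by
  have hcong : ∀ (acc : List Int), ∀ st ∈ PySem.List.pyRange 0 (lst.length : Int) 1,
      (PySem.List.pyRange st (lst.length : Int) 1).foldl (fun result dr =>
        if checkAllPrime (PySem.List.slice lst (some st) (some (dr + 1))) then
          if dr - st + 1 > (result.length : Int)
          then PySem.List.slice lst (some st) (some (dr + 1)) else result
        else result) acc
      = pvf acc ((lst.drop st.toNat).takeWhile altAllDigitsPrime) := by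
    intro r st hmem
    obtain ⟨hst0, hstn⟩ := (PySem.List.mem_pyRange_one).mp hmem
    rw [pv_inner_fold lst st hst0 ((lst.length : Int) - st).toNat st le_rfl (by omega) r]
    by_cases h : st - st + 1 ≤ (((lst.drop st.toNat).takeWhile altAllDigitsPrime).length : Int)
    · rw [if_pos h]
    · rw [if_neg h]
      have hnil : (lst.drop st.toNat).takeWhile altAllDigitsPrime = [] :=
        List.length_eq_zero_iff.mp (by omega)
      rw [hnil, pvf_nil_right]
  unfold get_longest_prime_digits
  simp only [PySem.List.len_eq]
  refine Eq.trans (PySem.List.foldl_congr_mem _ _ _ _ hcong) ?_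
  rw [PySem.List.pyRange_one, List.foldl_map]
  have hb := pv_lmax_best lst
  rw [List.foldl_map] at hb
  simp only [zero_add, Int.toNat_natCast, sub_zero]
  exact hb

theorem pv_B_fold (l : List Int) : ∀ (b c : List Int),
    (let s := l.foldl (fun (s : List Int × List Int) x =>
        if altAllDigitsPrime x then (s.1, s.2 ++ [x])
        else (if s.2.length > s.1.length then s.2 else s.1, ([] : List Int))) (b, c)
     if s.2.length > s.1.length then s.2 else s.1) = pvf b (pvm c l) := by
  induction l with
  | nil => intro b c; simp [pvm, pvf]
  | cons x l ih =>
    intro b c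
    simp only [List.foldl_cons, pvm]
    cases hx : altAllDigitsPrime x with
    | true => simpa [hx] using ih b (c ++ [x])
    | false =>
      simp only [Bool.false_eq_true, if_false]
      rw [show (if c.length > b.length then c else b) = pvf b c from rfl]
      rw [ih (pvf b c) [], pvf_assoc]

theorem pv_tw_best (l : List Int) :
    pvf (l.takeWhile altAllDigitsPrime) (pvbest l) = pvbest l := by
  cases l with
  | nil => rfl
  | cons x xs => rw [pvbest, pvf_idem]

theorem pv_m_eq (l : List Int) : ∀ (c : List Int),
    pvm c l = pvf (c ++ l.takeWhile altAllDigitsPrime) (pvbest l) := by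
  induction l with
  | nil => intro c; simp [pvm, pvbest, pvf_nil_right]
  | cons x l ih =>
    intro c
    cases hx : altAllDigitsPrime x with
    | true =>
      rw [pvm, if_pos (by simp [hx]), ih (c ++ [x])]
      rw [List.takeWhile_cons, hx, if_pos rfl]
      rw [pvbest, List.takeWhile_cons, hx, if_pos rfl]
      have hap : c ++ [x] ++ l.takeWhile altAllDigitsPrime
          = c ++ x :: l.takeWhile altAllDigitsPrime := by simp
      rw [hap]
      exact (pvf_absorb _ (x :: l.takeWhile altAllDigitsPrime) (pvbest l) (by simp)).symm
    | false =>
      rw [pvm, if_neg (by simp [hx]), ih []]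
      rw [List.takeWhile_cons, hx, if_neg (by simp)]
      rw [pvbest, List.takeWhile_cons, hx, if_neg (by simp), pvf_nil_left]
      simp only [List.nil_append, List.append_nil]
      rw [pv_tw_best]

theorem pv_B_eq_best (lst : List Int) : get_longest_prime_digits_alt lst = pvbest lst := by
  show (let s := lst.foldl _ ([], []);
        if s.2.length > s.1.length then s.2 else s.1) = pvbest lst
  rw [pv_B_fold lst [] [], pvf_nil_left, pv_m_eq lst [], List.nil_append, pv_tw_best]

-- ===== VERDICT (by name: the statement is the Claim_ definition above) =====
theorem get_longest_prime_digits_spec : Claim_equal_get_longest_prime_digits := by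
  intro lst _
  unfold Spec_get_longest_prime_digits
  rw [pv_A_eq_best, pv_B_eq_best]
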